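-- pv_equiv track=rewrite | github.com/serhankoral/VideoFlower | videoflower.py | choose_preferred_embed_url
-- ===== SOURCE A (Python) =====
-- def choose_preferred_embed_url(urls, rule=None):
--     """Kural önceliğine göre embed URL seç."""
--     if not urls:
--         return None
--     if len(urls) == 1 or not rule:
--         return urls[0]
--
--     priorities = [p.lower() for p in rule.get("embed_host_priority", [])]
--     if priorities:
--         for pr in priorities:
--             for url in urls:
--                 if pr in url.lower():
--                     return url
--     return urls[0]
-- ===== SOURCE B (Python) =====
-- def choose_preferred_embed_url(urls, rule=None):
--     """Kural önceliğine göre embed URL seç."""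
--     if not urls:
--         return None
--     if len(urls) == 1 or not rule:
--         return urls[0]
--
--     priorities = [p.lower() for p in rule.get("embed_host_priority", [])]
--     best = None  # (priority_index, url); earliest url wins ties
--     for url in urls:
--         low = url.lower()
--         idx = None
--         for i, pr in enumerate(priorities):
--             if pr in low:
--                 idx = i
--                 break
--         if idx is not None and (best is None or idx < best[0]):
--             best = (idx, url)
--     return best[1] if best is not None else urls[0]
-- ===== Notes on version B (the rewrite author's own statement) =====
-- stated objective: alternative
-- what changed: A scans all urls once per priority (priority-major nested loops with early return); B makes a single url-major pass keeping a running best (first-matching-priority index, url) pair, updating only on a strictly smaller index so the earliest url wins ties.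
import Mathlib
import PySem

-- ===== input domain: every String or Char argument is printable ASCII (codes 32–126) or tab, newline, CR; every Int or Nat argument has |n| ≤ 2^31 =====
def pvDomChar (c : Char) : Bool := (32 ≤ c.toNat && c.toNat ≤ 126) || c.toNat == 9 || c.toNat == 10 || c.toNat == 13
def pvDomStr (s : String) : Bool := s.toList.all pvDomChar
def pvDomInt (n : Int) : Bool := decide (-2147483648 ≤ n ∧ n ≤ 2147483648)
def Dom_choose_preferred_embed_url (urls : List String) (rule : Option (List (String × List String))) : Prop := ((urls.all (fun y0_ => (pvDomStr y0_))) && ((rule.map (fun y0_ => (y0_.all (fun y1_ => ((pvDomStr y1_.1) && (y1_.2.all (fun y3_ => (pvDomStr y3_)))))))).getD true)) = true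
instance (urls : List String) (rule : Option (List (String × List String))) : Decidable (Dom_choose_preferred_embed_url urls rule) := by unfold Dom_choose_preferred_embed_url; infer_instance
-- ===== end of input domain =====

-- B replaces A's priority-major double loop (scan all urls once per priority) by a single
-- pass over the urls that tracks the best (first-priority-index, url) pair — simpler flow,
-- one traversal of the urls.

-- ===== PORT A =====
-- rule.get("embed_host_priority", []): first-match lookup in the association list
def pvRuleGet (r : List (String × List String)) : List String :=
  ((r.find? (fun p => p.1 == "embed_host_priority")).map Prod.snd).getD []

-- inner 'for url in urls: if pr in url.lower(): return url'
def aInner (pr : String) (urls : List String) : Option String :=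
  match urls with
  | [] => none
  | u :: rest => if PySem.Str.isIn pr (PySem.Str.lower u) then some u else aInner pr rest

-- outer 'for pr in priorities' with the early return from the inner loop
def aOuter (priorities urls : List String) : Option String :=
  match priorities with
  | [] => none
  | pr :: rest =>
    match aInner pr urls with
    | some u => some u
    | none => aOuter rest urls

def choose_preferred_embed_url (urls : List String) (rule : Option (List (String × List String))) : Option String :=
  if urls = [] then none
  else if urls.length = 1 ∨ rule = none ∨ rule = some [] then urls.head?
  else
    let priorities := (pvRuleGet (rule.getD [])).map PySem.Str.lower
    match aOuter priorities urls with
    | some u => some u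
    | none => urls.head?

-- ===== PORT B =====
-- index of the first priority contained in the (already lowered) url, with break
def bFirstIdx (priorities : List String) (low : String) : Option Nat :=
  match priorities with
  | [] => none
  | pr :: rest =>
    if PySem.Str.isIn pr low then some 0 else (bFirstIdx rest low).map (· + 1)

-- loop body: update best only on a strictly smaller priority index
def bStep (priorities : List String) (best : Option (Nat × String)) (u : String) : Option (Nat × String) :=
  match bFirstIdx priorities (PySem.Str.lower u) with
  | none => best
  | some i =>
    match best with
    | none => some (i, u)
    | some (j, _) => if i < j then some (i, u) else best

def choose_preferred_embed_url_alt (urls : List String) (rule : Option (List (String × List String))) : Option String :=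
  if urls = [] then none
  else if urls.length = 1 ∨ rule = none ∨ rule = some [] then urls.head?
  else
    let priorities := (pvRuleGet (rule.getD [])).map PySem.Str.lower
    match urls.foldl (bStep priorities) none with
    | some (_, u) => some u
    | none => urls.head?

-- ===== PRECONDITION & SPEC =====
def Spec_choose_preferred_embed_url (urls : List String) (rule : Option (List (String × List String))) (out : Option String) : Prop := out = choose_preferred_embed_url_alt urls rule
instance (urls : List String) (rule : Option (List (String × List String))) (out : Option String) : Decidable (Spec_choose_preferred_embed_url urls rule out) := by unfold Spec_choose_preferred_embed_url; infer_instance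

-- ===== CLAIM (what is proved, stated in full; the proofs are below) =====
def Claim_equal_choose_preferred_embed_url : Prop := ∀ (urls : List String) (rule : Option (List (String × List String))), Dom_choose_preferred_embed_url urls rule → Spec_choose_preferred_embed_url urls rule (choose_preferred_embed_url urls rule)

-- ===== LEMMAS AND PROOFS =====

-- reference: structural argmin (earliest wins ties) of f over the urls
def minBy (f : String → Option Nat) : List String → Option (Nat × String)
  | [] => none
  | u :: rest =>
    match f u, minBy f rest with
    | none, r => r
    | some i, none => some (i, u)
    | some i, some (j, v) => if i ≤ j then some (i, u) else some (j, v)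

-- combining an accumulator with the argmin of the remaining list
def comb (a r : Option (Nat × String)) : Option (Nat × String) :=
  match a, r with
  | none, r => r
  | some (j, v), none => some (j, v)
  | some (j, v), some (i, u) => if i < j then some (i, u) else some (j, v)

theorem minBy_cons (f : String → Option Nat) (u : String) (tl : List String) :
    minBy f (u :: tl)
      = match f u, minBy f tl with
        | none, r => r
        | some i, none => some (i, u)
        | some i, some (j, v) => if i ≤ j then some (i, u) else some (j, v) := rfl

theorem bFirstIdx_cons (pr : String) (rest : List String) (low : String) :
    bFirstIdx (pr :: rest) low
      = if PySem.Str.isIn pr low then some 0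
        else (bFirstIdx rest low).map (· + 1) := rfl

theorem foldl_bStep_eq_minBy (ps : List String) (urls : List String) :
    ∀ acc, urls.foldl (bStep ps) acc
      = comb acc (minBy (fun u => bFirstIdx ps (PySem.Str.lower u)) urls) := by
  induction urls with
  | nil =>
    intro acc
    cases acc with
    | none => rfl
    | some p => cases p; rfl
  | cons u rest ih =>
    intro acc
    rw [List.foldl_cons, ih, minBy_cons]
    cases hf : bFirstIdx ps (PySem.Str.lower u) with
    | none =>
      cases acc with
      | none => simp [bStep, hf]
      | some p => cases p; simp [bStep, hf]
    | some i =>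
      cases hr : minBy (fun u => bFirstIdx ps (PySem.Str.lower u)) rest with
      | none =>
        cases acc with
        | none => simp [bStep, hf, comb]
        | some p =>
          obtain ⟨k, w⟩ := p
          by_cases hik : i < k <;> simp [bStep, hf, comb, hik]
      | some q =>
        obtain ⟨j, v⟩ := q
        cases acc with
        | none =>
          simp only [bStep, hf, comb]
          split_ifs with h1 h2 h3 <;> first | rfl | omega
        | some p =>
          obtain ⟨k, w⟩ := p
          simp only [bStep, hf]
          by_cases hik : i < k
          · rw [if_pos hik]
            by_cases hij : i ≤ j
            · rw [if_pos hij]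
              simp only [comb]
              rw [if_neg (by omega), if_pos hik]
            · rw [if_neg hij]
              simp only [comb]
              rw [if_pos (by omega), if_pos (by omega)]
          · rw [if_neg hik]
            by_cases hij : i ≤ j
            · rw [if_pos hij]
              simp only [comb]
              rw [if_neg (by omega), if_neg hik]
            · rw [if_neg hij]

theorem minBy_none (f : String → Option Nat) (hf : ∀ u, f u = none) :
    ∀ urls, minBy f urls = none := by
  intro urls
  induction urls with
  | nil => rfl
  | cons u rest ih => rw [minBy_cons, hf u, ih]

-- aInner hits u₀ ⇒ the argmin for (pr :: rest) is (0, u₀)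
theorem minBy_of_aInner_some (pr : String) (rest : List String) (urls : List String) (u₀ : String)
    (h : aInner pr urls = some u₀) :
    minBy (fun u => bFirstIdx (pr :: rest) (PySem.Str.lower u)) urls = some (0, u₀) := by
  induction urls with
  | nil => simp [aInner] at h
  | cons u tl ih =>
    rw [minBy_cons]
    by_cases hm : PySem.Str.isIn pr (PySem.Str.lower u) = true
    · unfold aInner at h
      rw [if_pos hm, Option.some_inj] at h
      subst h
      have hfu : bFirstIdx (pr :: rest) (PySem.Str.lower u) = some 0 := by
        rw [bFirstIdx_cons, if_pos hm]
      simp only [hfu]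
      cases hr : minBy (fun u => bFirstIdx (pr :: rest) (PySem.Str.lower u)) tl with
      | none => rfl
      | some q => obtain ⟨j, v⟩ := q; simp
    · unfold aInner at h
      rw [if_neg hm] at h
      have ihh := ih h
      have hfu : bFirstIdx (pr :: rest) (PySem.Str.lower u)
          = (bFirstIdx rest (PySem.Str.lower u)).map (· + 1) := by
        rw [bFirstIdx_cons, if_neg hm]
      simp only [hfu, ihh]
      cases hb : bFirstIdx rest (PySem.Str.lower u) with
      | none => rfl
      | some k => simp

-- no url matches pr ⇒ the argmin for (pr :: rest) is the argmin for rest, indices shifted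
theorem minBy_of_aInner_none (pr : String) (rest : List String) (urls : List String)
    (h : aInner pr urls = none) :
    minBy (fun u => bFirstIdx (pr :: rest) (PySem.Str.lower u)) urls
      = (minBy (fun u => bFirstIdx rest (PySem.Str.lower u)) urls).map
          (fun p => (p.1 + 1, p.2)) := by
  induction urls with
  | nil => rfl
  | cons u tl ih =>
    have hm : ¬ PySem.Str.isIn pr (PySem.Str.lower u) = true := by
      intro hc
      unfold aInner at h
      rw [if_pos hc] at h
      exact Option.some_ne_none _ h
    unfold aInner at h
    rw [if_neg hm] at h
    have ihh := ih h
    rw [minBy_cons, minBy_cons]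
    have hfu : bFirstIdx (pr :: rest) (PySem.Str.lower u)
        = (bFirstIdx rest (PySem.Str.lower u)).map (· + 1) := by
      rw [bFirstIdx_cons, if_neg hm]
    simp only [hfu, ihh]
    cases hb : bFirstIdx rest (PySem.Str.lower u) with
    | none => simp only [Option.map_none]
    | some k =>
      simp only [Option.map_some]
      cases hr : minBy (fun u => bFirstIdx rest (PySem.Str.lower u)) tl with
      | none => rfl
      | some q =>
        obtain ⟨j, v⟩ := q
        simp only [Option.map_some]
        by_cases hkj : k ≤ j
        · rw [if_pos hkj, if_pos (by omega)]
          rfl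
        · rw [if_neg hkj, if_neg (by omega)]
          rfl

theorem aOuter_eq_minBy (ps urls : List String) :
    aOuter ps urls
      = (minBy (fun u => bFirstIdx ps (PySem.Str.lower u)) urls).map Prod.snd := by
  induction ps with
  | nil =>
    rw [minBy_none (fun u => bFirstIdx [] (PySem.Str.lower u)) (fun u => rfl) urls]
    rfl
  | cons pr rest ih =>
    cases h : aInner pr urls with
    | some u₀ =>
      simp [aOuter, h, minBy_of_aInner_some pr rest urls u₀ h]
    | none =>
      simp only [aOuter, h, ih, minBy_of_aInner_none pr rest urls h, Option.map_map]
      cases minBy (fun u => bFirstIdx rest (PySem.Str.lower u)) urls <;> rfl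

-- ===== VERDICT (by name: the statement is the Claim_ definition above) =====
theorem choose_preferred_embed_url_spec : Claim_equal_choose_preferred_embed_url := by
  intro urls rule _
  unfold Spec_choose_preferred_embed_url choose_preferred_embed_url choose_preferred_embed_url_alt
  split_ifs with h1 h2
  · rfl
  · rfl
  · have hfold := foldl_bStep_eq_minBy
      ((pvRuleGet (rule.getD [])).map PySem.Str.lower) urls none
    have hout := aOuter_eq_minBy ((pvRuleGet (rule.getD [])).map PySem.Str.lower) urls
    simp only [comb] at hfold
    simp only [hfold, hout]
    cases minBy (fun u => bFirstIdx ((pvRuleGet (rule.getD [])).map PySem.Str.lower)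
        (PySem.Str.lower u)) urls with
    | none => rfl
    | some q => obtain ⟨i, u⟩ := q; rfl
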